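-- pv_equiv track=rewrite | github.com/xiaodizhang8/ICPCES-2023 | ConformantPlanning/extract_plan.py | extract_fd_plan
-- ===== SOURCE A (Python) =====
-- def extract_fd_plan(output):
--     plan = list()
--     if 'Solution found!' in output:
--         output = str(output).split('\n')
--         # 寻找solution found的行数
--         index = 0
--         for line in output:
--             line = line.strip()
--             if 'Solution found!' in line:
--                 break
--             index += 1
--         # 读取plan
--         for index in range(index+2, len(output)):
--             line = output[index].strip()
--             if 'Plan length' in line:
--                 break
--             action = ' '.join(line.split()[:-1]).upper()
--             plan.append(action)
--         return plan
--     else: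
--         return None
-- ===== SOURCE B (Python) =====
-- def extract_fd_plan(output):
--     if 'Solution found!' not in output:
--         return None
--     plan = []
--     state = 0  # 0 = searching for the marker, 1 = skip one line, 2 = collecting
--     for raw in output.split('\n'):
--         line = raw.strip()
--         if state == 0:
--             if 'Solution found!' in line:
--                 state = 1
--         elif state == 1:
--             state = 2
--         else:
--             if 'Plan length' in line:
--                 break
--             plan.append(' '.join(line.split()[:-1]).upper())
--     return plan
-- ===== Notes on version B (the rewrite author's own statement) =====
-- stated objective: alternative
-- what changed: Replaces A's two loops (an index-counting scan to locate the marker line, then a second loop indexing lines by range(index+2, len)) with a single pass over the lines driven by a three-state machine (searching / skip one line / collecting), with no indexing at all.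
import Mathlib
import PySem

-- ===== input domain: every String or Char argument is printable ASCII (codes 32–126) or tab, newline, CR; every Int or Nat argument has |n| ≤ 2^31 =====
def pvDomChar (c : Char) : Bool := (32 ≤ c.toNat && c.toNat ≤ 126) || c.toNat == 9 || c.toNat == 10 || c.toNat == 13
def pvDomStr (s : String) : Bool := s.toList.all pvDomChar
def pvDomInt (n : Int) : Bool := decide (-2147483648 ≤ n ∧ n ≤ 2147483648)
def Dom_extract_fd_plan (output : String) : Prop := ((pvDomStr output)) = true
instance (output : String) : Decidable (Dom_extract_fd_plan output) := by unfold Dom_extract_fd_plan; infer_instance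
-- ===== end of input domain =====

-- B replaces A's two loops (locate the marker's line index, then index lines by range(index+2, len))
-- with a single pass over the lines driven by a three-state machine; same O(n) cost (objective: alternative).

-- ===== PORT A =====
-- first loop: count lines until one (stripped) contains 'Solution found!'
def extractA_findIndex : List String → Nat → Nat
  | [], index => index
  | l :: rest, index =>
    if PySem.Str.isIn "Solution found!" (PySem.Str.strip l) then index
    else extractA_findIndex rest (index + 1)

-- second loop: over the indices of range(index+2, len(output)), with break on 'Plan length'
def extractA_collect (lines : List String) : List Int → List String → List String
  | [], plan => plan
  | i :: rest, plan =>
    match PySem.List.pyGet? lines i with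
    | none => plan  -- unreachable: every index of range(index+2, len) is in bounds
    | some raw =>
      let line := PySem.Str.strip raw
      if PySem.Str.isIn "Plan length" line then plan
      else extractA_collect lines rest
        (plan ++ [PySem.Str.upper (PySem.Str.join " " (PySem.List.slice (PySem.Str.split₀ line) none (some (-1))))])

def extract_fd_plan (output : String) : Option (List String) :=
  if PySem.Str.isIn "Solution found!" output then
    let lines := (PySem.Str.split? output "\n").getD []   -- sep ≠ "", so split? is always `some`
    let index := extractA_findIndex lines 0
    some (extractA_collect lines (PySem.List.pyRange ((index : Int) + 2) (lines.length : Int)) [])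
  else
    none

-- ===== PORT B =====
-- single pass; state 0 = searching, 1 = skip one line, 2 = collecting
def extractB_go : List String → Nat → List String → List String
  | [], _, plan => plan
  | raw :: rest, 0, plan =>
    if PySem.Str.isIn "Solution found!" (PySem.Str.strip raw) then extractB_go rest 1 plan
    else extractB_go rest 0 plan
  | _ :: rest, 1, plan => extractB_go rest 2 plan
  | raw :: rest, _ + 2, plan =>
    if PySem.Str.isIn "Plan length" (PySem.Str.strip raw) then plan
    else extractB_go rest 2
      (plan ++ [PySem.Str.upper (PySem.Str.join " " (PySem.List.slice (PySem.Str.split₀ (PySem.Str.strip raw)) none (some (-1))))])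

def extract_fd_plan_alt (output : String) : Option (List String) :=
  if PySem.Str.isIn "Solution found!" output then
    some (extractB_go ((PySem.Str.split? output "\n").getD []) 0 [])
  else
    none

-- ===== PRECONDITION & SPEC =====
def Spec_extract_fd_plan (output : String) (out : Option (List String)) : Prop := out = extract_fd_plan_alt output
instance (output : String) (out : Option (List String)) : Decidable (Spec_extract_fd_plan output out) := by unfold Spec_extract_fd_plan; infer_instance

-- ===== CLAIM (what is proved, stated in full; the proofs are below) =====
def Claim_equal_extract_fd_plan : Prop := ∀ (output : String), Dom_extract_fd_plan output → Spec_extract_fd_plan output (extract_fd_plan output)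

-- ===== LEMMAS AND PROOFS =====

-- the first loop with a shifted counter
theorem extractA_findIndex_shift (xs : List String) (i : Nat) :
    extractA_findIndex xs i = i + extractA_findIndex xs 0 := by
  induction xs generalizing i with
  | nil => simp [extractA_findIndex]
  | cons l rest ih =>
    simp only [extractA_findIndex]
    split_ifs with h
    · omega
    · rw [ih (i + 1), ih 1]; omega

-- A's indexed second loop over range(index+2, len) IS B's collecting state on lines.drop k
theorem collect_eq_go (lines : List String) (k : Nat) (plan : List String) :
    extractA_collect lines (PySem.List.pyRange (k : Int) (lines.length : Int)) plan
      = extractB_go (lines.drop k) 2 plan := by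
  by_cases hk : k < lines.length
  · rw [PySem.List.pyRange_one_cons (by exact_mod_cast hk),
        List.drop_eq_getElem_cons hk]
    simp only [extractA_collect, extractB_go, PySem.List.pyGet?_natCast,
      List.getElem?_eq_getElem hk]
    split_ifs with hp
    · rfl
    · have hc : ((k : Int) + 1) = ((k + 1 : Nat) : Int) := by push_cast; ring
      rw [hc, collect_eq_go lines (k + 1)]
  · rw [PySem.List.pyRange_one_eq_nil (by exact_mod_cast Nat.le_of_not_lt hk),
        List.drop_eq_nil_of_le (Nat.le_of_not_lt hk)]
    rfl
termination_by lines.length - k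

-- the skip-one state
theorem go_state1 (xs : List String) (plan : List String) :
    extractB_go xs 1 plan = extractB_go xs.tail 2 plan := by
  cases xs <;> rfl

-- the searching state reaches the collecting state at lines.drop (index + 2)
theorem go_state0 (lines : List String) (plan : List String) :
    extractB_go lines 0 plan
      = extractB_go (lines.drop (extractA_findIndex lines 0 + 2)) 2 plan := by
  induction lines with
  | nil => rfl
  | cons l rest ih =>
    simp only [extractB_go, extractA_findIndex]
    split_ifs with h
    · rw [go_state1]
      have h2 : (0 + 2 : Nat) = 1 + 1 := by omega
      rw [h2, List.drop_succ_cons, List.drop_one]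
    · rw [ih, extractA_findIndex_shift rest 1]
      have h3 : 1 + extractA_findIndex rest 0 + 2 = (extractA_findIndex rest 0 + 2) + 1 := by omega
      rw [h3, List.drop_succ_cons]

-- ===== VERDICT (by name: the statement is the Claim_ definition above) =====
theorem extract_fd_plan_spec : Claim_equal_extract_fd_plan := by
  intro output _
  unfold Spec_extract_fd_plan
  by_cases h : PySem.Str.isIn "Solution found!" output = true
  · simp only [extract_fd_plan, extract_fd_plan_alt, h, reduceIte]
    have hc : ((extractA_findIndex ((PySem.Str.split? output "\n").getD []) 0 : Int) + 2)
        = ((extractA_findIndex ((PySem.Str.split? output "\n").getD []) 0 + 2 : Nat) : Int) := by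
      push_cast; ring
    rw [hc, collect_eq_go, go_state0]
  · simp only [extract_fd_plan, extract_fd_plan_alt, h, Bool.false_eq_true, reduceIte]
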